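-- pv_equiv track=rewrite | github.com/aravind-raju/algorithms | 22/Feb/array/bacteria_reproduction.py | bacteria_reproduction_v2
-- ===== SOURCE A (Python) =====
-- from typing import List
--
-- def bacteria_reproduction_v2(init_culture: List, simtime: int, rc: int, cd: int) -> int:
-- 	"""
-- 	Calculates the bacteria reproduction rate
-- 	"""
-- 	culture = {}
-- 	# create the culture dict structure
-- 	for i in range(len(init_culture)):
-- 		culture[i] = {
--   			'value': init_culture[i],
--   			'count': 1,
--   			'cd': 0
-- 	 	}
-- 	#Simulation Loop
-- 	for time in range(simtime):
-- 		for culture_key in culture.keys():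
-- 			#Cooldown Check
-- 			if culture[culture_key]['cd'] > 0:
-- 				culture[culture_key]['cd'] -= 1
-- 				continue
-- 			#Spawn Check
-- 			if culture[culture_key]['value'] >= rc:
-- 				culture[culture_key]['value'] = 0
-- 				culture[culture_key]['count'] *= 2
-- 				culture[culture_key]['cd'] = cd - 1
-- 			else:
-- 				culture[culture_key]['value'] += 1
-- 	#sum of count of culture
-- 	return sum([i['count'] for i in culture.values()])
-- ===== SOURCE B (Python) =====
-- from typing import List
--
-- def bacteria_reproduction_v2(init_culture: List, simtime: int, rc: int, cd: int) -> int: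
--     """Closed-form per culture: each culture spawns first at t0 = max(rc - v, 0),
--     then every P = max(cd-1, 0) + max(rc, 0) + 1 steps; its count is 2**spawns."""
--     steps = max(simtime, 0)
--     period = max(cd - 1, 0) + max(rc, 0) + 1
--     total = 0
--     for v in init_culture:
--         t0 = max(rc - v, 0)
--         spawns = 0 if steps <= t0 else (steps - 1 - t0) // period + 1
--         total += 2 ** spawns
--     return total
-- ===== Notes on version B (the rewrite author's own statement) =====
-- stated objective: faster
-- what changed: B replaces A's per-time-step dict simulation with a closed form per culture: the first spawn happens after max(rc-v,0) steps and every max(cd-1,0)+max(rc,0)+1 steps thereafter, so each culture contributes 2**spawns directly.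
import Mathlib
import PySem

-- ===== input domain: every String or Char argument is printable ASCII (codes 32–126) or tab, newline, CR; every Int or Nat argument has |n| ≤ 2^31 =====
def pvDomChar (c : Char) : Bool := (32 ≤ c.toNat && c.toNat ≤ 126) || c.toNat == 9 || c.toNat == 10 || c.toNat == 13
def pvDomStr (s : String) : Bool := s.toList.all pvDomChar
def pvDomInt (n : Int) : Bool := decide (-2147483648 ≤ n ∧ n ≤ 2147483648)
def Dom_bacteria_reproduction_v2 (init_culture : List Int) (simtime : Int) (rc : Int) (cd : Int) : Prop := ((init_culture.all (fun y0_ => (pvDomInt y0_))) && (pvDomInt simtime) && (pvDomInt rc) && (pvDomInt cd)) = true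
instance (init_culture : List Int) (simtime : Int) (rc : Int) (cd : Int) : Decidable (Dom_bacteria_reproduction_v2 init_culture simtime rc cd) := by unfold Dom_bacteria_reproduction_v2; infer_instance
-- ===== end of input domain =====

-- B replaces A's step-by-step simulation (O(n·simtime)) by a closed form per culture
-- (first spawn at max(rc-v,0), then one spawn every max(cd-1,0)+max(rc,0)+1 steps): O(n).

-- ===== PORT A =====
-- The inner Python dict {'value':…, 'count':…, 'cd':…} has three fixed string keys; it is
-- ported as the triple (value, count, cd).  The outer dict is PySem.Dict Int _.
-- `culture[culture_key]` is `getD culture_key (0,1,0)`: the key is always present, the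
-- default is never used.
def bacteria_reproduction_v2 (init_culture : List Int) (simtime : Int) (rc : Int) (cd : Int) : Int :=
  -- create the culture dict structure
  let culture : PySem.Dict Int (Int × Int × Int) :=
    (PySem.List.pyRange 0 (init_culture.length : Int) 1).foldl
      (fun culture i => culture.insert i (PySem.List.pyGetD init_culture i 0, 1, 0))
      PySem.Dict.empty
  -- Simulation Loop
  let culture :=
    (PySem.List.pyRange 0 simtime 1).foldl
      (fun culture _time =>
        culture.keys.foldl
          (fun culture culture_key =>
            let s := culture.getD culture_key (0, 1, 0)
            -- Cooldown Check
            if s.2.2 > 0 then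
              culture.insert culture_key (s.1, s.2.1, s.2.2 - 1)
            -- Spawn Check
            else if s.1 ≥ rc then
              culture.insert culture_key (0, s.2.1 * 2, cd - 1)
            else
              culture.insert culture_key (s.1 + 1, s.2.1, s.2.2))
          culture)
      culture
  -- sum of count of culture
  (culture.values.map (fun i => i.2.1)).sum

-- ===== PORT B =====
-- `2 ** spawns` with spawns ≥ 0 is `2 ^ spawns.toNat`.
def bacteria_reproduction_v2_alt (init_culture : List Int) (simtime : Int) (rc : Int) (cd : Int) : Int :=
  let steps := max simtime 0
  let period := max (cd - 1) 0 + max rc 0 + 1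
  init_culture.foldl
    (fun total v =>
      let t0 := max (rc - v) 0
      let spawns : Int :=
        if steps ≤ t0 then 0 else PySem.Int.floordiv (steps - 1 - t0) period + 1
      total + 2 ^ spawns.toNat)
    0

-- ===== PRECONDITION & SPEC =====
def Spec_bacteria_reproduction_v2 (init_culture : List Int) (simtime : Int) (rc : Int) (cd : Int) (out : Int) : Prop := out = bacteria_reproduction_v2_alt init_culture simtime rc cd
instance (init_culture : List Int) (simtime : Int) (rc : Int) (cd : Int) (out : Int) : Decidable (Spec_bacteria_reproduction_v2 init_culture simtime rc cd out) := by unfold Spec_bacteria_reproduction_v2; infer_instance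

-- ===== CLAIM (what is proved, stated in full; the proofs are below) =====
def Claim_equal_bacteria_reproduction_v2 : Prop := ∀ (init_culture : List Int) (simtime : Int) (rc : Int) (cd : Int), Dom_bacteria_reproduction_v2 init_culture simtime rc cd → Spec_bacteria_reproduction_v2 init_culture simtime rc cd (bacteria_reproduction_v2 init_culture simtime rc cd)

-- ===== LEMMAS AND PROOFS =====

-- the per-culture, per-time-step transition of A's simulation loop
def pvStep (rc cd : Int) (s : Int × Int × Int) : Int × Int × Int :=
  if s.2.2 > 0 then (s.1, s.2.1, s.2.2 - 1)
  else if s.1 ≥ rc then (0, s.2.1 * 2, cd - 1)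
  else (s.1 + 1, s.2.1, s.2.2)

lemma pv_phase1 (rc cd v : Int) :
    ∀ r : Nat, (r : Int) ≤ max (rc - v) 0 →
      (pvStep rc cd)^[r] (v, 1, 0) = (v + r, 1, 0) := by
  intro r
  induction r with
  | zero => intro _; simp
  | succ r ih =>
    intro h
    rw [Function.iterate_succ_apply', ih (by push_cast at h ⊢; omega)]
    simp only [pvStep]
    rw [if_neg (by omega), if_neg (by push_cast at h ⊢; omega)]
    push_cast
    ring_nf

lemma pv_first_spawn (rc cd v : Int) :
    (pvStep rc cd)^[(max (rc - v) 0).toNat + 1] (v, 1, 0) = (0, 2, cd - 1) := by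
  rw [Function.iterate_succ_apply', pv_phase1 rc cd v _ (by omega)]
  simp only [pvStep]
  rw [if_neg (by omega), if_pos (by omega)]
  norm_num

lemma pv_period_mid (rc cd c : Int) :
    ∀ r : Nat, (r : Int) < max (cd - 1) 0 + max rc 0 + 1 →
      (pvStep rc cd)^[r] (0, c, cd - 1)
        = (max ((r : Int) - max (cd - 1) 0) 0, c, cd - 1 - min (r : Int) (max (cd - 1) 0)) := by
  intro r
  induction r with
  | zero => intro _; simp only [Function.iterate_zero, id_eq, Prod.mk.injEq]; refine ⟨by omega, by trivial, by omega⟩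
  | succ r ih =>
    intro h
    rw [Function.iterate_succ_apply', ih (by push_cast at h ⊢; omega)]
    simp only [pvStep]
    by_cases hcool : (r : Int) < max (cd - 1) 0
    · rw [if_pos (by omega)]
      simp only [Prod.mk.injEq]
      push_cast
      refine ⟨by omega, by trivial, by omega⟩
    · -- past the cooldown: the value is r - c1 < max rc 0, and rc > 0 here unless it spawns never
      have hrc : 0 < rc := by
        by_contra hrc
        push_cast at h
        omega
      rw [if_neg (by omega), if_neg (by push_cast at h ⊢; omega)]
      simp only [Prod.mk.injEq]
      push_cast
      refine ⟨by omega, by trivial, by omega⟩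

lemma pv_period_full (rc cd c : Int) :
    (pvStep rc cd)^[(max (cd - 1) 0 + max rc 0 + 1).toNat] (0, c, cd - 1) = (0, c * 2, cd - 1) := by
  have hP : (max (cd - 1) 0 + max rc 0 + 1).toNat = (max (cd - 1) 0 + max rc 0).toNat + 1 := by omega
  rw [hP, Function.iterate_succ_apply',
    pv_period_mid rc cd c _ (by omega)]
  simp only [pvStep]
  rw [if_neg (by omega)]
  rw [if_pos (by omega)]

lemma pv_period_pow (rc cd c : Int) :
    ∀ q : Nat, (pvStep rc cd)^[q * (max (cd - 1) 0 + max rc 0 + 1).toNat] (0, c, cd - 1)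
      = (0, c * 2 ^ q, cd - 1) := by
  intro q
  induction q with
  | zero => simp
  | succ q ih =>
    rw [show (q + 1) * (max (cd - 1) 0 + max rc 0 + 1).toNat
        = (max (cd - 1) 0 + max rc 0 + 1).toNat + q * (max (cd - 1) 0 + max rc 0 + 1).toNat by ring,
      Function.iterate_add_apply, ih, pv_period_full]
    simp only [Prod.mk.injEq]
    refine ⟨by trivial, by ring, by trivial⟩

lemma pv_count_closed (rc cd v : Int) (m : Nat) :
    ((pvStep rc cd)^[m] (v, 1, 0)).2.1
      = 2 ^ (if (m : Int) ≤ max (rc - v) 0 then 0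
             else (m - 1 - (max (rc - v) 0).toNat) / (max (cd - 1) 0 + max rc 0 + 1).toNat + 1) := by
  by_cases hm : (m : Int) ≤ max (rc - v) 0
  · rw [if_pos hm, pv_phase1 rc cd v m hm]
    norm_num
  · rw [if_neg hm]
    set t0 : Nat := (max (rc - v) 0).toNat with ht0
    set P : Nat := (max (cd - 1) 0 + max rc 0 + 1).toNat with hP
    have hPpos : 0 < P := by omega
    have hmt : t0 + 1 ≤ m := by omega
    set d : Nat := m - 1 - t0 with hd
    obtain ⟨q, r, hrP, hqr, hsplit⟩ :
        ∃ q r, r < P ∧ q = d / P ∧ m = r + (q * P + (t0 + 1)) := by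
      refine ⟨d / P, d % P, Nat.mod_lt _ hPpos, rfl, ?_⟩
      have hq := Nat.div_add_mod d P
      rw [Nat.mul_comm (d / P) P]
      omega
    have hrI : (r : Int) < max (cd - 1) 0 + max rc 0 + 1 := by omega
    rw [hsplit, Function.iterate_add_apply, Function.iterate_add_apply,
      pv_first_spawn, pv_period_pow,
      pv_period_mid rc cd _ r hrI]
    simp only
    rw [hqr, pow_succ]
    ring


lemma pv_fold_insert_items (g : Int × Int × Int → Int × Int × Int) :
    ∀ (ks : List Int) (d : PySem.Dict Int (Int × Int × Int)),
      d.keys.Nodup → ks.Nodup → (∀ k ∈ ks, k ∈ d.keys) →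
      (ks.foldl (fun d k => d.insert k (g (d.getD k (0, 1, 0)))) d).items
        = d.items.map (fun p => if p.1 ∈ ks then (p.1, g p.2) else p) := by
  intro ks
  induction ks with
  | nil => intro d hnd _ _; simp
  | cons k ks ih =>
    intro d hnd hks hsub
    have hk : d.contains k = true := (PySem.Dict.contains_iff_mem_keys d k).2 (hsub k (by simp))
    have hitems : (d.insert k (g (d.getD k (0,1,0)))).items
        = d.items.map (fun p => if p.1 = k then (k, g p.2) else p) := by
      rw [PySem.Dict.items_insert_of_contains d _ hk]
      apply List.map_congr_left
      intro p hp
      by_cases h : p.1 = k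
      · have hp' : (p.1, p.2) ∈ d.items := by simpa using hp
        rw [h] at hp'
        simp [h]
        congr 1
        exact PySem.Dict.getD_of_mem_items d hp' hnd _
      · simp [h]
    have hkeys : (d.insert k (g (d.getD k (0,1,0)))).keys = d.keys :=
      PySem.Dict.keys_insert_of_contains d _ hk
    have hnd' : (d.insert k (g (d.getD k (0,1,0)))).keys.Nodup := hkeys ▸ hnd
    have hsub' : ∀ k' ∈ ks, k' ∈ (d.insert k (g (d.getD k (0,1,0)))).keys := by
      intro k' hk'; rw [hkeys]; exact hsub k' (by simp [hk'])
    rw [List.foldl_cons, ih _ hnd' (List.Nodup.of_cons hks) hsub', hitems, List.map_map]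
    apply List.map_congr_left
    intro p hp
    have hknot : k ∉ ks := (List.nodup_cons.1 hks).1
    by_cases h : p.1 = k
    · simp [h, hknot]
    · by_cases h2 : p.1 ∈ ks <;> simp [h, h2]

lemma pv_inner_items (g : Int × Int × Int → Int × Int × Int)
    (d : PySem.Dict Int (Int × Int × Int)) (hnd : d.keys.Nodup) :
    (d.keys.foldl (fun d k => d.insert k (g (d.getD k (0, 1, 0)))) d).items
      = d.items.map (fun p => (p.1, g p.2)) := by
  rw [pv_fold_insert_items g d.keys d hnd hnd (fun k hk => hk)]
  apply List.map_congr_left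
  intro p hp
  simp [PySem.Dict.mem_keys_of_mem_items d hp]

lemma pv_outer_items (rc cd : Int) (pvStep : Int → Int → (Int × Int × Int) → (Int × Int × Int)) :
    ∀ (ts : List Int) (d : PySem.Dict Int (Int × Int × Int)), d.keys.Nodup →
      (ts.foldl
        (fun culture _time =>
          culture.keys.foldl
            (fun culture culture_key =>
              culture.insert culture_key (pvStep rc cd (culture.getD culture_key (0, 1, 0))))
            culture)
        d).items
      = d.items.map (fun p => (p.1, (pvStep rc cd)^[ts.length] p.2)) := by
  intro ts
  induction ts with
  | nil => intro d hnd; simp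
  | cons t ts ih =>
    intro d hnd
    have h1 := pv_inner_items (pvStep rc cd) d hnd
    have hkeys : (d.keys.foldl (fun d k => d.insert k (pvStep rc cd (d.getD k (0,1,0)))) d).keys
        = d.keys := by
      have h2 := congrArg (List.map (fun p : Int × (Int × Int × Int) => p.1)) h1
      simpa [List.map_map, PySem.Dict.keys] using h2
    rw [List.foldl_cons]
    have hnd' : (List.foldl (fun d k => d.insert k (pvStep rc cd (d.getD k (0, 1, 0)))) d
        d.keys).keys.Nodup := by rw [hkeys]; exact hnd
    rw [ih _ hnd', h1, List.map_map]
    apply List.map_congr_left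
    intro p hp
    simp [Function.iterate_succ_apply, Function.comp]

lemma pv_init_items (init_culture : List Int) :
    ((PySem.List.pyRange 0 (init_culture.length : Int) 1).foldl
      (fun culture i => culture.insert i (PySem.List.pyGetD init_culture i 0, 1, 0))
      (PySem.Dict.empty : PySem.Dict Int (Int × Int × Int))).items
    = (List.range init_culture.length).map
        (fun j => (Int.ofNat j, (init_culture.getD j 0, 1, 0))) := by
  rw [PySem.List.pyRange_zero_natCast, List.foldl_map]
  rw [PySem.Dict.items_foldl_insert_fresh (List.range init_culture.length)
      (fun k => (k : Int)) (fun k => (PySem.List.pyGetD init_culture (k : Int) 0, 1, 0))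
      PySem.Dict.empty (by simp) ?_]
  · simp only [PySem.Dict.empty, List.nil_append]
    apply List.map_congr_left
    intro j hj
    simp [PySem.List.pyGetD_natCast, Int.ofNat_eq_natCast]
  · exact (List.nodup_range).map (fun a b => by exact_mod_cast id)

lemma pv_range_len (simtime : Int) :
    (PySem.List.pyRange 0 simtime 1).length = simtime.toNat := by
  rcases Int.lt_or_le simtime 0 with h | h
  · have : simtime.toNat = 0 := Int.toNat_of_nonpos h.le
    rw [this]
    simp [PySem.List.pyRange]
    omega
  · obtain ⟨n, rfl⟩ := Int.eq_ofNat_of_zero_le h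
    rw [show ((n : Int)) = ((n : Nat) : Int) from rfl, PySem.List.pyRange_zero_natCast]
    simp


-- A's inner loop body is an insert of pvStep of the current value
lemma pv_innerF_eq (rc cd : Int) :
    (fun (culture : PySem.Dict Int (Int × Int × Int)) (culture_key : Int) =>
      if (culture.getD culture_key (0, 1, 0)).2.2 > 0 then
        culture.insert culture_key
          ((culture.getD culture_key (0, 1, 0)).1, (culture.getD culture_key (0, 1, 0)).2.1,
            (culture.getD culture_key (0, 1, 0)).2.2 - 1)
      else
        if (culture.getD culture_key (0, 1, 0)).1 ≥ rc then
          culture.insert culture_key (0, (culture.getD culture_key (0, 1, 0)).2.1 * 2, cd - 1)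
        else
          culture.insert culture_key
            ((culture.getD culture_key (0, 1, 0)).1 + 1, (culture.getD culture_key (0, 1, 0)).2.1,
              (culture.getD culture_key (0, 1, 0)).2.2))
    = fun culture culture_key =>
        culture.insert culture_key (pvStep rc cd (culture.getD culture_key (0, 1, 0))) := by
  funext d k
  simp only [pvStep]
  split_ifs <;> rfl

-- B's Int-valued spawn count agrees with the Nat-valued closed form
lemma pv_pow_bridge (simtime rc cd v : Int) :
    (2 : Int) ^ (if max simtime 0 ≤ max (rc - v) 0 then (0 : Int)
        else PySem.Int.floordiv (max simtime 0 - 1 - max (rc - v) 0)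
          (max (cd - 1) 0 + max rc 0 + 1) + 1).toNat
      = 2 ^ (if (simtime.toNat : Int) ≤ max (rc - v) 0 then 0
             else (simtime.toNat - 1 - (max (rc - v) 0).toNat)
               / (max (cd - 1) 0 + max rc 0 + 1).toNat + 1) := by
  by_cases hc : max simtime 0 ≤ max (rc - v) 0
  · rw [if_pos hc, if_pos (by omega)]
    rfl
  · rw [if_neg hc, if_neg (by omega)]
    congr 1
    have h1 : max simtime 0 - 1 - max (rc - v) 0
        = ((simtime.toNat - 1 - (max (rc - v) 0).toNat : Nat) : Int) := by omega
    have h2 : max (cd - 1) 0 + max rc 0 + 1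
        = (((max (cd - 1) 0 + max rc 0 + 1).toNat : Nat) : Int) := by omega
    rw [h1, h2, PySem.Int.floordiv_natCast]
    simp only [Int.toNat_natCast]
    generalize (simtime.toNat - 1 - (max (rc - v) 0).toNat)
        / (max (cd - 1) 0 + max rc 0 + 1).toNat = t
    omega

-- indexing a list by range(len(...)) is just mapping over the list
lemma pv_map_getD (F : Int → Int) (l : List Int) :
    List.map (fun j => F (l.getD j 0)) (List.range l.length) = List.map F l := by
  apply List.ext_getElem
  · simp
  · intro i h1 h2
    simp at h1 h2 ⊢
    simp [List.getElem?_eq_getElem h2]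

-- ===== VERDICT (by name: the statement is the Claim_ definition above) =====
theorem bacteria_reproduction_v2_spec : Claim_equal_bacteria_reproduction_v2 := by
  intro init_culture simtime rc cd _h
  unfold Spec_bacteria_reproduction_v2
  simp only [bacteria_reproduction_v2, bacteria_reproduction_v2_alt]
  rw [pv_innerF_eq rc cd]
  have hD0 := pv_init_items init_culture
  have hnd : (((PySem.List.pyRange 0 (init_culture.length : Int) 1).foldl
      (fun culture i => culture.insert i (PySem.List.pyGetD init_culture i 0, 1, 0))
      PySem.Dict.empty : PySem.Dict Int (Int × Int × Int))).keys.Nodup := by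
    apply PySem.Dict.nodup_keys_foldl_insert
    simp
  simp only [PySem.Dict.values]
  rw [pv_outer_items rc cd pvStep (PySem.List.pyRange 0 simtime 1) _ hnd]
  rw [hD0]
  rw [pv_range_len]
  simp only [List.map_map, Function.comp_def]
  have hmap := pv_map_getD
    (fun v => ((pvStep rc cd)^[simtime.toNat] (v, 1, 0)).2.1) init_culture
  rw [hmap, PySem.List.foldl_add, zero_add]
  congr 1
  apply List.map_congr_left
  intro v _
  rw [pv_count_closed rc cd v simtime.toNat, ← pv_pow_bridge simtime rc cd v]
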